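-- pv_equiv track=rewrite | github.com/razvanb00/AiLabs | lab1/main.py | generate_binary_nums
-- ===== SOURCE A (Python) =====
-- def generate_binary_nums(nr):
--     bin_nums = []
--     k = 1
--
--     while len(bin_nums) < nr:
--         if len(bin_nums) == 0:
--             bin_nums.append(k)
--             k *= 10
--             continue  # needed for case when nr = 1
--         bin_nums.append(k)
--         for number in bin_nums[:len(bin_nums) - 1]:
--             if len(bin_nums) == nr:
--                 return bin_nums
--             bin_nums.append(number + k)
--         k *= 10
--     return bin_nums
-- ===== SOURCE B (Python) =====
-- def generate_binary_nums(nr):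
--     result = []
--     while len(result) < nr:
--         i = len(result) + 1
--         if i == 1:
--             result.append(1)
--         else:
--             result.append(10 * result[i // 2 - 1] + i % 2)
--     return result
-- ===== Notes on version B (the rewrite author's own statement) =====
-- stated objective: simpler
-- what changed: B fills the list with the direct recurrence result[i-1] = 10*result[i//2-1] + i%2 (reading off the binary digits of each index i by halving), replacing A's BFS-style expansion that appends a power of ten and then re-scans a snapshot of the list adding it to every earlier element.
import Mathlib
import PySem

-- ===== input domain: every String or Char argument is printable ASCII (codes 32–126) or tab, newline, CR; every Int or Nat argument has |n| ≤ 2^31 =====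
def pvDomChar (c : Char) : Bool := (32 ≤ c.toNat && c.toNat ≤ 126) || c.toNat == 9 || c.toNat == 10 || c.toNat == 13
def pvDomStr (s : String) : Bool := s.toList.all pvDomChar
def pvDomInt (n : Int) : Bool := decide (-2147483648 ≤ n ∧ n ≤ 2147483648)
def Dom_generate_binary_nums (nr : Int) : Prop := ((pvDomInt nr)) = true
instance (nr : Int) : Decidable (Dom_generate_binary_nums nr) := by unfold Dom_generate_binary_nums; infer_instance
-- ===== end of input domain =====

-- B computes each element directly as the decimal reading of the binary digits of its
-- index i = 1..nr, replacing A's BFS-style expansion over a snapshot of the list (simpler).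

-- ===== PORT A =====
-- the inner `for number in bin_nums[:len(bin_nums)-1]` loop, with its early return
-- (the Bool records whether `return bin_nums` fired)
def pvInner (nr : Int) (bn : List Int) (xs : List Int) (k : Int) : List Int × Bool :=
  match xs with
  | [] => (bn, false)
  | x :: rest =>
    if (bn.length : Int) = nr then (bn, true)
    else pvInner nr (bn ++ [x + k]) rest k

-- the outer while loop; fuel only makes the recursion total (each iteration grows the
-- list by at least one, so nr.toNat + 1 iterations always reach the exit condition)
def pvOuter (fuel : Nat) (nr : Int) (bn : List Int) (k : Int) : List Int :=
  match fuel with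
  | 0 => bn
  | f + 1 =>
    if (bn.length : Int) < nr then
      if bn.length = 0 then pvOuter f nr (bn ++ [k]) (k * 10)
      else
        match pvInner nr (bn ++ [k]) bn k with
        | (bn2, true) => bn2
        | (bn2, false) => pvOuter f nr bn2 (k * 10)
    else bn

def generate_binary_nums (nr : Int) : List Int := pvOuter (nr.toNat + 1) nr [] 1

-- ===== PORT B =====
-- the `while len(result) < nr` loop of Source B; fuel only makes the recursion total
-- (the list grows by one each iteration, so nr.toNat iterations always suffice)
def pvBLoop (fuel : Nat) (nr : Int) (result : List Int) : List Int :=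
  match fuel with
  | 0 => result
  | f + 1 =>
    if (result.length : Int) < nr then
      if ((result.length : Int) + 1) = 1 then
        pvBLoop f nr (result ++ [1])
      else
        -- result[i // 2 - 1] with i = len(result) + 1: the index is provably in range
        -- (0 ≤ i//2 - 1 < len since i ≥ 2), so the `.getD 0` default is never used
        pvBLoop f nr (result ++
          [10 * ((PySem.List.pyGet? result
                    (PySem.Int.floordiv ((result.length : Int) + 1) 2 - 1)).getD 0)
            + PySem.Int.mod ((result.length : Int) + 1) 2])
    else result

def generate_binary_nums_alt (nr : Int) : List Int := pvBLoop nr.toNat nr []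

-- ===== PRECONDITION & SPEC =====
def Spec_generate_binary_nums (nr : Int) (out : List Int) : Prop := out = generate_binary_nums_alt nr
instance (nr : Int) (out : List Int) : Decidable (Spec_generate_binary_nums nr out) := by unfold Spec_generate_binary_nums; infer_instance

-- ===== CLAIM (what is proved, stated in full; the proofs are below) =====
def Claim_equal_generate_binary_nums : Prop := ∀ (nr : Int), Dom_generate_binary_nums nr → Spec_generate_binary_nums nr (generate_binary_nums nr)

-- ===== LEMMAS AND PROOFS =====

-- the common mathematical description: binN n = decimal reading of n's binary digits
def binN : Nat → Int
  | 0 => 0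
  | n + 1 => 10 * binN ((n + 1) / 2) + ((n + 1) % 2)

def pvSeq (m : Nat) : List Int := (List.range m).map (fun j => binN (j + 1))

theorem binN_eq (n : Nat) : binN n = 10 * binN (n / 2) + (n % 2 : Nat) := by
  cases n with
  | zero => simp [binN]
  | succ n => simp [binN]

theorem binN_pow_add {t j : Nat} (hj : j < 2 ^ t) :
    binN (2 ^ t + j) = 10 ^ t + binN j := by
  induction t generalizing j with
  | zero => interval_cases j; norm_num [binN]
  | succ t ih =>
    rw [binN_eq (2 ^ (t + 1) + j)]
    have h1 : (2 ^ (t + 1) + j) / 2 = 2 ^ t + j / 2 := by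
      rw [pow_succ]; omega
    have h2 : (2 ^ (t + 1) + j) % 2 = j % 2 := by
      rw [pow_succ]; omega
    rw [h1, h2, ih (by rw [pow_succ] at hj; omega), binN_eq j]
    push_cast
    ring

theorem binN_zero : binN 0 = 0 := by simp [binN]

theorem binN_one : binN 1 = 1 := by rw [binN_eq]; norm_num [binN_zero]

theorem pvSeq_len (m : Nat) : (pvSeq m).length = m := by simp [pvSeq]

-- ----- B side -----

theorem pvSeq_succ (m : Nat) : pvSeq (m + 1) = pvSeq m ++ [binN (m + 1)] := by
  simp [pvSeq, List.range_succ]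

theorem pvBLoop_eq (nr : Int) : ∀ (fuel m : Nat), nr - m ≤ fuel →
    pvBLoop fuel nr (pvSeq m) = pvSeq (max m nr.toNat) := by
  intro fuel
  induction fuel with
  | zero =>
    intro m h
    rw [pvBLoop]
    congr 1
    omega
  | succ f ih =>
    intro m h
    rw [pvBLoop]
    by_cases hlt : ((pvSeq m).length : Int) < nr
    · rw [if_pos hlt]
      rw [pvSeq_len] at hlt
      rw [pvSeq_len]
      by_cases hm : m = 0
      · subst hm
        rw [if_pos (by norm_num)]
        rw [show pvSeq 0 ++ [(1 : Int)] = pvSeq 1 by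
          rw [pvSeq_succ 0, binN_one]]
        rw [ih 1 (by omega)]
        congr 1
        omega
      · rw [if_neg (by push_cast; omega)]
        have h12 : 1 ≤ (m + 1) / 2 := by omega
        have hdiv : PySem.Int.floordiv ((m : Int) + 1) 2 = (((m + 1) / 2 : Nat) : Int) := by
          rw [show ((m : Int) + 1) = (((m + 1 : Nat)) : Int) by push_cast; ring]
          exact PySem.Int.floordiv_natCast (m + 1) 2
        have hmod : PySem.Int.mod ((m : Int) + 1) 2 = (((m + 1) % 2 : Nat) : Int) := by
          rw [show ((m : Int) + 1) = (((m + 1 : Nat)) : Int) by push_cast; ring]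
          exact PySem.Int.mod_natCast (m + 1) 2
        have hk : ((((m + 1) / 2 : Nat)) : Int) - 1 = (((m + 1) / 2 - 1 : Nat) : Int) := by
          rw [Nat.cast_sub h12]
          norm_num
        have hidx : (m + 1) / 2 - 1 < m := by omega
        have hget : PySem.List.pyGet? (pvSeq m) ((((m + 1) / 2 - 1 : Nat)) : Int)
            = some (binN ((m + 1) / 2)) := by
          rw [PySem.List.pyGet?_natCast]
          simp only [pvSeq, List.getElem?_map, List.getElem?_range hidx, Option.map_some]
          exact congrArg some (congrArg binN (by omega))
        rw [hdiv, hmod, hk, hget]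
        rw [show (Option.getD (some (binN ((m + 1) / 2))) 0) = binN ((m + 1) / 2) from rfl]
        rw [show (10 * binN ((m + 1) / 2) + (((m + 1) % 2 : Nat) : Int)) = binN (m + 1) from
          (binN_eq (m + 1)).symm]
        rw [← pvSeq_succ m]
        rw [ih (m + 1) (by push_cast; omega)]
        congr 1
        omega
    · rw [if_neg hlt]
      rw [pvSeq_len] at hlt
      congr 1
      omega

theorem alt_eq (nr : Int) : generate_binary_nums_alt nr = pvSeq nr.toNat := by
  rw [generate_binary_nums_alt,
    show ([] : List Int) = pvSeq 0 by simp [pvSeq],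
    pvBLoop_eq nr nr.toNat 0 (by push_cast; omega)]
  rfl

-- ----- A side -----

theorem pvInner_eq (nr k : Int) : ∀ (xs bn : List Int), (bn.length : Int) ≤ nr →
    pvInner nr bn xs k =
      (bn ++ ((xs.take (nr - bn.length).toNat).map (· + k)),
       decide ((nr - (bn.length : Int)) < (xs.length : Int))) := by
  intro xs
  induction xs with
  | nil =>
    intro bn h
    rw [pvInner]
    simp only [List.take_nil, List.map_nil, List.append_nil, List.length_nil, Nat.cast_zero,
      Prod.mk.injEq]
    exact ⟨trivial, (decide_eq_false (by omega)).symm⟩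
  | cons x rest ih =>
    intro bn h
    rw [pvInner]
    by_cases he : (bn.length : Int) = nr
    · rw [if_pos he]
      have h0 : (nr - (bn.length : Int)).toNat = 0 := by omega
      rw [h0]
      simp only [List.take_zero, List.map_nil, List.append_nil, Prod.mk.injEq, List.length_cons]
      refine ⟨trivial, ?_⟩
      rw [eq_comm, decide_eq_true_iff]
      push_cast
      omega
    · rw [if_neg he]
      rw [ih (bn ++ [x + k])
        (by simp only [List.length_append, List.length_cons, List.length_nil]; push_cast; omega)]
      have hlen : (nr - (bn.length : Int)).toNat = (nr - ((bn ++ [x + k]).length : Int)).toNat + 1 := by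
        simp only [List.length_append, List.length_cons, List.length_nil]
        push_cast
        omega
      simp only [Prod.mk.injEq]
      refine ⟨?_, ?_⟩
      · rw [hlen, List.take_succ_cons]
        simp
      · rw [decide_eq_decide]
        simp only [List.length_append, List.length_cons, List.length_nil]
        push_cast
        omega

theorem pvSeq_take {m τ : Nat} (h : τ ≤ m) : (pvSeq m).take τ = pvSeq τ := by
  simp [pvSeq, ← List.map_take, List.take_range, Nat.min_eq_left h]

theorem pvSeq_add (a b : Nat) :
    pvSeq (a + b) = pvSeq a ++ (List.range b).map (fun j => binN (a + j + 1)) := by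
  simp only [pvSeq, List.range_add, List.map_append, List.map_map]
  rfl

theorem binN_pow (t : Nat) : binN (2 ^ t) = 10 ^ t := by
  have h := binN_pow_add (t := t) (j := 0) (by positivity)
  rw [Nat.add_zero, binN_zero, add_zero] at h
  exact h

-- the expanded list after one full outer round: P(2^t) ++ shifted prefix = P(2^t + τ)
theorem pvExpand (t τ : Nat) (hτ : τ ≤ 2 ^ t - 1) :
    pvSeq (2 ^ t) ++ (((pvSeq (2 ^ t - 1)).take τ).map (· + (10 : Int) ^ t)) =
      pvSeq (2 ^ t + τ) := by
  rw [pvSeq_take hτ, pvSeq_add]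
  congr 1
  simp only [pvSeq, List.map_map]
  apply List.map_congr_left
  intro j hj
  simp only [List.mem_range] at hj
  simp only [Function.comp]
  have h2 : 1 ≤ 2 ^ t := Nat.one_le_two_pow
  have hjlt : j + 1 < 2 ^ t := by omega
  rw [show 2 ^ t + j + 1 = 2 ^ t + (j + 1) by omega, binN_pow_add hjlt]
  ring

theorem pvOuter_eq (nr : Int) : ∀ (f t : Nat), 1 ≤ t →
    ((2 ^ t : Nat) : Int) - 1 ≤ nr → (nr - (((2 ^ t : Nat) : Int) - 1)).toNat < f →
    pvOuter f nr (pvSeq (2 ^ t - 1)) (10 ^ t) = pvSeq nr.toNat := by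
  intro f
  induction f with
  | zero => intro t _ _ hf; omega
  | succ f ih =>
    intro t ht hle hf
    have h2t : 1 ≤ 2 ^ t := Nat.one_le_two_pow
    have h2t2 : 2 ≤ 2 ^ t := by
      calc 2 = 2 ^ 1 := rfl
        _ ≤ 2 ^ t := Nat.pow_le_pow_right (by omega) ht
    have hcast : ((2 ^ t - 1 : Nat) : Int) = ((2 ^ t : Nat) : Int) - 1 := by
      rw [Nat.cast_sub h2t]; norm_num
    rw [pvOuter]
    have hlen : ((pvSeq (2 ^ t - 1)).length : Int) = ((2 ^ t : Nat) : Int) - 1 := by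
      rw [pvSeq_len, hcast]
    by_cases hlt : ((pvSeq (2 ^ t - 1)).length : Int) < nr
    · rw [if_pos hlt]
      rw [if_neg (show ¬ (pvSeq (2 ^ t - 1)).length = 0 by rw [pvSeq_len]; omega)]
      have hk : pvSeq (2 ^ t - 1) ++ [(10 : Int) ^ t] = pvSeq (2 ^ t) := by
        have h1 : pvSeq (2 ^ t) = pvSeq (2 ^ t - 1 + 1) := by congr 1; omega
        rw [h1, pvSeq_add]
        simp only [List.range_one, List.map_cons, List.map_nil]
        rw [show 2 ^ t - 1 + 0 + 1 = 2 ^ t by omega, binN_pow]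
      rw [hk]
      rw [hlen] at hlt
      have hle2 : ((pvSeq (2 ^ t)).length : Int) ≤ nr := by rw [pvSeq_len]; omega
      rw [pvInner_eq nr (10 ^ t) (pvSeq (2 ^ t - 1)) (pvSeq (2 ^ t)) hle2]
      rw [pvSeq_len, pvSeq_len]
      by_cases hret : nr - ((2 ^ t : Nat) : Int) < ((2 ^ t - 1 : Nat) : Int)
      · have hflag : decide (nr - ((2 ^ t : Nat) : Int) < ((2 ^ t - 1 : Nat) : Int)) = true :=
          decide_eq_true hret
        simp only [hflag]
        have hτ : (nr - ((2 ^ t : Nat) : Int)).toNat ≤ 2 ^ t - 1 := by omega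
        rw [pvExpand t _ hτ]
        congr 1
        omega
      · have hflag : decide (nr - ((2 ^ t : Nat) : Int) < ((2 ^ t - 1 : Nat) : Int)) = false :=
          decide_eq_false hret
        simp only [hflag]
        have htake : List.take (nr - ((2 ^ t : Nat) : Int)).toNat (pvSeq (2 ^ t - 1))
            = (pvSeq (2 ^ t - 1)).take (2 ^ t - 1) := by
          rw [List.take_of_length_le (by rw [pvSeq_len]; omega),
              List.take_of_length_le (by rw [pvSeq_len])]
        rw [htake]
        have hexp := pvExpand t (2 ^ t - 1) (le_refl _)
        rw [hexp]
        have hnext : 2 ^ t + (2 ^ t - 1) = 2 ^ (t + 1) - 1 := by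
          have hp : 2 ^ (t + 1) = 2 ^ t + 2 ^ t := by rw [pow_succ]; omega
          omega
        rw [hnext, show (10 : Int) ^ t * 10 = 10 ^ (t + 1) from (pow_succ 10 t).symm]
        have h2t1 : 1 ≤ 2 ^ (t + 1) := Nat.one_le_two_pow
        have hcast2 : ((2 ^ (t + 1) - 1 : Nat) : Int) = ((2 ^ (t + 1) : Nat) : Int) - 1 := by
          rw [Nat.cast_sub h2t1]; norm_num
        have hpcast : ((2 ^ (t + 1) : Nat) : Int) = ((2 ^ t : Nat) : Int) * 2 := by
          push_cast [pow_succ]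
          ring
        by_cases hcont : ((2 ^ (t + 1) : Nat) : Int) - 1 < nr
        · exact ih (t + 1) (by omega) (by omega) (by omega)
        · have heq : ((2 ^ (t + 1) : Nat) : Int) - 1 = nr := by omega
          cases f with
          | zero => exfalso; omega
          | succ f' =>
            rw [pvOuter]
            rw [if_neg (show ¬ ((pvSeq (2 ^ (t + 1) - 1)).length : Int) < nr by
              rw [pvSeq_len]; omega)]
            congr 1
            omega
    · rw [if_neg hlt]
      rw [hlen] at hlt
      congr 1
      omega

theorem a_eq (nr : Int) : generate_binary_nums nr = pvSeq nr.toNat := by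
  rw [generate_binary_nums]
  by_cases h : 0 < nr
  · rw [pvOuter]
    rw [if_pos (show ((([] : List Int).length : Int) < nr) by simpa using h), if_pos (show ([] : List Int).length = 0 from rfl)]
    have h1 : ([] : List Int) ++ [(1 : Int)] = pvSeq (2 ^ 1 - 1) := by
      simp [pvSeq, List.range_one, binN_one]
    have h2 : (1 : Int) * 10 = 10 ^ 1 := by norm_num
    rw [h1, h2]
    exact pvOuter_eq nr nr.toNat 1 (le_refl 1) (by push_cast; omega) (by push_cast; omega)
  · rw [pvOuter, if_neg (by simp only [List.length_nil, Nat.cast_zero]; omega)]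
    have h0 : nr.toNat = 0 := by omega
    simp [h0, pvSeq]

-- ===== VERDICT (by name: the statement is the Claim_ definition above) =====
theorem generate_binary_nums_spec : Claim_equal_generate_binary_nums := by
  intro nr _
  unfold Spec_generate_binary_nums
  rw [a_eq, alt_eq]
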